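-- pv_equiv track=rewrite | github.com/chargerfox/Fox_ProxiShop | scripts/get_card_info_bkp1.py | find_text_override
-- ===== SOURCE A (Python) =====
-- def find_text_override(db, name, collector):
--     """
--     Busca coincidencia:
--     1) Name + Collector
--     2) Name solamente (fallback)
--     """
--     name = name.strip().lower()
--     collector = (collector or "").strip()
--
--     exact_match = None
--     name_match = None
--
--     for row in db:
--         row_name = row.get("Name", "").strip().lower()
--         row_collector = row.get("Collector", "").strip()
--
--         if row_name == name and row_collector == collector and collector:
--             exact_match = row
--             break
--
--         if row_name == name and not row_collector:
--             name_match = row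
--
--     return exact_match or name_match
-- ===== SOURCE B (Python) =====
-- def find_text_override(db, name, collector):
--     """Two targeted scans: first exact Name+Collector hit, else last name-only row
--     with empty Collector (found as first match of a reversed scan)."""
--     n = name.strip().lower()
--     c = (collector or "").strip()
--     if c:
--         exact = next((row for row in db
--                       if row.get("Name", "").strip().lower() == n
--                       and row.get("Collector", "").strip() == c), None)
--         if exact is not None:
--             return exact
--     return next((row for row in reversed(db)
--                  if row.get("Name", "").strip().lower() == n
--                  and not row.get("Collector", "").strip()), None)
-- ===== Notes on version B (the rewrite author's own statement) =====
-- stated objective: simpler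
-- what changed: Replaces A's single pass with two break/overwrite accumulators by two declarative scans: next() over db for the first exact Name+Collector match, else next() over reversed(db) for the last name-only match with empty Collector.
import Mathlib
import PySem

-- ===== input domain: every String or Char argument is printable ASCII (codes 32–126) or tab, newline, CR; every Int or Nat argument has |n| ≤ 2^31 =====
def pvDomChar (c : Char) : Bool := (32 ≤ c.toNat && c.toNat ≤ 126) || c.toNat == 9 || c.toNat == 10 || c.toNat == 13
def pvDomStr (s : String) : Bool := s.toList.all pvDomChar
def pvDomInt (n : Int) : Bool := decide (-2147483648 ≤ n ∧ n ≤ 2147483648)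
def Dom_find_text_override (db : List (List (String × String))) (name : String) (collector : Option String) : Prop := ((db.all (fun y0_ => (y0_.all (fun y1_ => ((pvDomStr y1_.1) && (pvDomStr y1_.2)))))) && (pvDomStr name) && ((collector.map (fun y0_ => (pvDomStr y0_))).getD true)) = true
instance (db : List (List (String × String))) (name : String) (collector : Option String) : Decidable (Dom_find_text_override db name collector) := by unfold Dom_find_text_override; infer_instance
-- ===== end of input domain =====

-- B replaces A's one-pass two-accumulator loop with two declarative scans (first exact
-- match, else first name-only match of a reversed scan); return value proved equal everywhere.

-- row.get("Name", "").strip().lower()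
def pvRowName (r : List (String × String)) : String :=
  PySem.Str.lower (PySem.Str.strip ((PySem.Dict.mk r).getD "Name" ""))

-- row.get("Collector", "").strip()
def pvRowColl (r : List (String × String)) : String :=
  PySem.Str.strip ((PySem.Dict.mk r).getD "Collector" "")

-- ===== PORT A =====
-- the for-loop: carries (exact_match, name_match); break = stop recursing
def pvALoop (n c : String) (nm : Option (List (String × String))) :
    List (List (String × String)) →
    Option (List (String × String)) × Option (List (String × String))
  | [] => (none, nm)
  | row :: rest =>
    let rn := pvRowName row
    let rc := pvRowColl row
    if rn = n ∧ rc = c ∧ c ≠ "" then (some row, nm)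
    else pvALoop n c (if rn = n ∧ rc = "" then some row else nm) rest

def find_text_override (db : List (List (String × String))) (name : String) (collector : Option String) : Option (List (String × String)) :=
  let n := PySem.Str.lower (PySem.Str.strip name)
  let c := PySem.Str.strip (match collector with | none => "" | some s => s)
  let res := pvALoop n c none db
  -- 'exact_match or name_match': a dict is falsy iff empty
  match res.1 with
  | some r => if r ≠ [] then some r else res.2
  | none => res.2

-- ===== PORT B =====
def find_text_override_alt (db : List (List (String × String))) (name : String) (collector : Option String) : Option (List (String × String)) :=
  let n := PySem.Str.lower (PySem.Str.strip name)
  let c := PySem.Str.strip (match collector with | none => "" | some s => s)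
  let exact : Option (List (String × String)) :=
    if c ≠ "" then db.find? (fun r => pvRowName r == n && pvRowColl r == c) else none
  match exact with
  | some r => some r
  | none => db.reverse.find? (fun r => pvRowName r == n && pvRowColl r == "")

-- ===== PRECONDITION & SPEC =====
def Spec_find_text_override (db : List (List (String × String))) (name : String) (collector : Option String) (out : Option (List (String × String))) : Prop := out = find_text_override_alt db name collector
instance (db : List (List (String × String))) (name : String) (collector : Option String) (out : Option (List (String × String))) : Decidable (Spec_find_text_override db name collector out) := by unfold Spec_find_text_override; infer_instance

-- ===== CLAIM (what is proved, stated in full; the proofs are below) =====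
def Claim_equal_find_text_override : Prop := ∀ (db : List (List (String × String))) (name : String) (collector : Option String), Dom_find_text_override db name collector → Spec_find_text_override db name collector (find_text_override db name collector)

-- ===== LEMMAS AND PROOFS =====

-- a row whose stripped Collector is nonempty is a nonempty dict
lemma pvRowColl_nil : pvRowColl [] = "" := by decide

-- the combined result of A's loop, for any starting name_match accumulator
lemma pvALoop_eq (n c : String) (db : List (List (String × String)))
    (nm : Option (List (String × String))) :
    (match (pvALoop n c nm db).1 with
      | some r => if r ≠ [] then some r else (pvALoop n c nm db).2
      | none => (pvALoop n c nm db).2) =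
    (match db.find? (fun r => pvRowName r == n && pvRowColl r == c && decide (c ≠ "")) with
      | some r => some r
      | none =>
        match db.reverse.find? (fun r => pvRowName r == n && pvRowColl r == "") with
        | some r => some r
        | none => nm) := by
  induction db generalizing nm with
  | nil => simp [pvALoop]
  | cons row rest ih =>
    by_cases hp : pvRowName row = n ∧ pvRowColl row = c ∧ c ≠ ""
    · have hrow : row ≠ [] := by
        intro h; subst h
        exact hp.2.2 (hp.2.1 ▸ pvRowColl_nil.symm ▸ pvRowColl_nil)
      simp [pvALoop, hp, hrow]
    · have hp' : (pvRowName row == n && pvRowColl row == c && decide (c ≠ "")) = false := by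
        simp only [Bool.and_eq_false_iff, beq_eq_false_iff_ne, decide_eq_false_iff_not]
        by_cases h1 : pvRowName row = n
        · by_cases h2 : pvRowColl row = c
          · right; exact fun hc => hp ⟨h1, h2, hc⟩
          · left; right; exact h2
        · left; left; exact h1
      rw [show pvALoop n c nm (row :: rest) =
            pvALoop n c (if pvRowName row = n ∧ pvRowColl row = "" then some row else nm) rest
          from by simp [pvALoop, hp]]
      rw [ih]
      have hrev : (row :: rest).reverse = rest.reverse ++ [row] := by simp
      rw [List.find?_cons, hp', hrev, List.find?_append]
      by_cases hq : pvRowName row = n ∧ pvRowColl row = ""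
      · simp [hq.1, hq.2]
        cases rest.reverse.find? (fun r => pvRowName r == n && pvRowColl r == "") <;> simp
      · have hq' : (pvRowName row == n && pvRowColl row == "") = false := by
          simp only [Bool.and_eq_false_iff, beq_eq_false_iff_ne]
          by_cases h1 : pvRowName row = n
          · right; exact fun h2 => hq ⟨h1, h2⟩
          · left; exact h1
        simp [hq, hq']

-- ===== VERDICT (by name: the statement is the Claim_ definition above) =====
theorem pv_main (db : List (List (String × String))) (n c : String) :
    (match (pvALoop n c none db).1 with
      | some r => if r ≠ [] then some r else (pvALoop n c none db).2
      | none => (pvALoop n c none db).2) =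
    (match (if c ≠ "" then db.find? (fun r => pvRowName r == n && pvRowColl r == c) else none) with
      | some r => some r
      | none => db.reverse.find? (fun r => pvRowName r == n && pvRowColl r == "")) := by
  have h := pvALoop_eq n c db none
  have hid : ∀ (o : Option (List (String × String))),
      (match o with | some r => some r | none => none) = o := fun o => by cases o <;> rfl
  by_cases hc : c = ""
  · subst hc
    have hf : db.find? (fun r => pvRowName r == n && pvRowColl r == "" && decide (("":String) ≠ "")) = none := by
      induction db with
      | nil => rfl
      | cons a l ih => simpa [List.find?] using ih
    rw [hf] at h
    simp only at h
    rw [hid] at h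
    simpa using h
  · have hpe : (fun r => pvRowName r == n && pvRowColl r == c && decide (c ≠ "")) =
        (fun r => pvRowName r == n && pvRowColl r == c) := by
      funext r; simp [hc]
    rw [hpe] at h
    rw [if_pos hc]
    rw [h]
    cases db.find? (fun r => pvRowName r == n && pvRowColl r == c) <;> simp [hid]

theorem find_text_override_spec : Claim_equal_find_text_override := by
  intro db name collector _
  unfold Spec_find_text_override
  cases collector <;>
    exact pv_main db _ _
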